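-- pv_equiv track=rewrite | github.com/CvanderStoep/adventofcode2016 | day20.py | find_lowest_ip
-- ===== SOURCE A (Python) =====
-- def find_lowest_ip(lines: list) -> int:
--     begin_interval, end_interval = lines[0]
--     for (b, e) in lines:
--         if b - 1 <= end_interval:
--             end_interval = max(end_interval, e)
--         else:
--             lowest_ip = end_interval + 1
--             return lowest_ip
-- ===== SOURCE B (Python) =====
-- def find_lowest_ip(lines: list) -> int:
--     # Phase 1: prefix-maximum table of end values; run_end[i] is the running
--     # max the gap test at position i must be compared against.
--     run_end = [lines[0][1]]
--     for _, e in lines[:-1]: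
--         run_end.append(max(run_end[-1], e))
--     # Phase 2: scan for the first gap.
--     for (b, _), m in zip(lines, run_end):
--         if b - 1 > m:
--             return m + 1
-- ===== Notes on version B (the rewrite author's own statement) =====
-- stated objective: alternative
-- what changed: Replaces A's single fused loop carrying a running end_interval with a two-phase algorithm: first build a prefix-maximum table of interval ends, then a separate scan over (line, table) pairs returns at the first gap.
-- outside the precondition, e.g. on find_lowest_ip([(0, 5)]): A returns None, B returns None
import Mathlib
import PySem

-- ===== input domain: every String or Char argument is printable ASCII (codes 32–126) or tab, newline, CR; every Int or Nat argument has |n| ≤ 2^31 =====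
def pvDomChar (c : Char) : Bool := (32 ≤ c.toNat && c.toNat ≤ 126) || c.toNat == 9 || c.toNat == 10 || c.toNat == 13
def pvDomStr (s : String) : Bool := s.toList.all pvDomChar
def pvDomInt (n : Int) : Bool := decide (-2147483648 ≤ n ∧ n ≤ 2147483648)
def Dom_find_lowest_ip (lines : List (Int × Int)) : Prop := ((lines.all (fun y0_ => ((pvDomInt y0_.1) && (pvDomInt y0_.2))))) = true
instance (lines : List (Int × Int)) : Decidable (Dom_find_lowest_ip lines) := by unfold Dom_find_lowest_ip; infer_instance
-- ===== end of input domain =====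

-- B replaces A's fused running-max loop by a prefix-max table plus a separate gap scan (alternative decomposition, same cost); equivalence is about the return value on inputs where A returns an int.

-- ===== PORT A =====
-- A's for-loop: carries end_interval, returns end_interval+1 at the first gap, none if the loop finishes (Python returns None there; excluded by Pre_).
def findLoopA : List (Int × Int) → Int → Option Int
  | [], _ => none
  | (b, e) :: rest, endInterval =>
      if b - 1 ≤ endInterval then findLoopA rest (max endInterval e)
      else some (endInterval + 1)

def find_lowest_ip (lines : List (Int × Int)) : Int :=
  match lines with
  | [] => 0  -- lines[0] raises IndexError in Python; excluded by Pre_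
  | (_, endInterval) :: _ => (findLoopA lines endInterval).getD 0  -- getD 0: None return excluded by Pre_

-- ===== PORT B =====
-- phase 1 of Source B: the appended tail of run_end (run_end[-1] is the accumulator).
def runEndAux : List (Int × Int) → Int → List Int
  | [], _ => []
  | (_, e) :: rest, last => max last e :: runEndAux rest (max last e)

-- phase 2 of Source B: scan zip(lines, run_end) for the first gap.
def gapScan : List ((Int × Int) × Int) → Option Int
  | [] => none
  | ((b, _), m) :: rest => if b - 1 > m then some (m + 1) else gapScan rest

def find_lowest_ip_alt (lines : List (Int × Int)) : Int :=
  match lines with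
  | [] => 0  -- lines[0][1] raises IndexError in Python; excluded by Pre_
  | (_, e0) :: _ =>
      let runEnd := e0 :: runEndAux lines.dropLast e0  -- lines[:-1] = List.dropLast (exact)
      (gapScan (lines.zip runEnd)).getD 0  -- getD 0: None return excluded by Pre_

-- ===== PRECONDITION & SPEC =====
-- Pre_ excludes the empty list (A raises IndexError) and interval lists with no gap
-- (the loop finishes and A returns None, which is not a value of the declared int type).
def Pre_find_lowest_ip (lines : List (Int × Int)) : Prop :=
  lines ≠ [] ∧ ∃ i ∈ List.range lines.length,
    ∀ j ∈ List.range (max i 1), (lines.getD j (0, 0)).2 < (lines.getD i (0, 0)).1 - 1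
instance (lines : List (Int × Int)) : Decidable (Pre_find_lowest_ip lines) := by
  unfold Pre_find_lowest_ip; infer_instance
def pvWitness_find_lowest_ip : (List (Int × Int)) := [(0, 2), (5, 9)]

def Spec_find_lowest_ip (lines : List (Int × Int)) (out : Int) : Prop := out = find_lowest_ip_alt lines
instance (lines : List (Int × Int)) (out : Int) : Decidable (Spec_find_lowest_ip lines out) := by unfold Spec_find_lowest_ip; infer_instance

-- ===== CLAIM (what is proved, stated in full; the proofs are below) =====
def Claim_equal_find_lowest_ip : Prop := ∀ (lines : List (Int × Int)), Dom_find_lowest_ip lines → Pre_find_lowest_ip lines → Spec_find_lowest_ip lines (find_lowest_ip lines)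

-- ===== LEMMAS AND PROOFS =====

-- Core invariant: B's scan over lines zipped with (acc :: prefix-maxes of dropLast)
-- computes exactly A's fused loop started at accumulator acc.
theorem gapScan_eq_findLoopA (xs : List (Int × Int)) (acc : Int) :
    gapScan (xs.zip (acc :: runEndAux xs.dropLast acc)) = findLoopA xs acc := by
  induction xs generalizing acc with
  | nil => simp [gapScan, findLoopA]
  | cons hd tl ih =>
      obtain ⟨b, e⟩ := hd
      cases tl with
      | nil =>
          simp only [List.zip, List.zipWith, gapScan, findLoopA]
          by_cases h : b - 1 ≤ acc <;> simp [h]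
      | cons x tl' =>
          have hdl : ((b, e) :: x :: tl').dropLast = (b, e) :: (x :: tl').dropLast := rfl
          rw [hdl]
          simp only [runEndAux, List.zip, List.zipWith, gapScan, findLoopA]
          by_cases h : b - 1 ≤ acc
          · have h' : ¬ b - 1 > acc := by omega
            simp only [h, if_true, h', if_false]
            exact ih (max acc e)
          · have h' : b - 1 > acc := by omega
            simp [h, h']

theorem ports_agree (lines : List (Int × Int)) :
    find_lowest_ip lines = find_lowest_ip_alt lines := by
  cases lines with
  | nil => rfl
  | cons hd tl =>
      obtain ⟨b0, e0⟩ := hd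
      show (findLoopA ((b0, e0) :: tl) e0).getD 0
          = (gapScan (((b0, e0) :: tl).zip (e0 :: runEndAux ((b0, e0) :: tl).dropLast e0))).getD 0
      rw [gapScan_eq_findLoopA]

-- ===== VERDICT (by name: the statement is the Claim_ definition above) =====
theorem find_lowest_ip_spec : Claim_equal_find_lowest_ip := by
  intro lines _ _
  unfold Spec_find_lowest_ip
  exact ports_agree lines
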